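-- pv_equiv track=rewrite | github.com/hybridlogic/txMySQL | txmysql/util.py | pack_little_endian
-- ===== SOURCE A (Python) =====
-- def pack_little_endian(v, pad_to=None):
--     ret = ''
--     while v:
--         ret += chr(v & 0xff)
--         v >>= 8
--     if pad_to is not None:
--         ret = ret.ljust(pad_to, '\0')
--     return ret
-- ===== SOURCE B (Python) =====
-- def pack_little_endian(v, pad_to=None):
--     def go(x):
--         if x == 0:
--             return ''
--         q, r = divmod(x, 256)
--         return chr(r) + go(q)
--     ret = go(v)
--     if pad_to is not None and len(ret) < pad_to:
--         ret = ret + '\0' * (pad_to - len(ret))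
--     return ret
-- ===== Notes on version B (the rewrite author's own statement) =====
-- stated objective: alternative
-- what changed: Replaces the imperative while-loop with bitwise mask/shift (v & 0xff, v >>= 8) and ljust padding by a recursive base-256 decomposition via divmod (chr(r) prepended to the recursive pack of q) with arithmetic '\0'*(pad_to-len) padding. Pre_ excludes v < 0, where A loops forever (v >>= 8 converges to -1).
import Mathlib
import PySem

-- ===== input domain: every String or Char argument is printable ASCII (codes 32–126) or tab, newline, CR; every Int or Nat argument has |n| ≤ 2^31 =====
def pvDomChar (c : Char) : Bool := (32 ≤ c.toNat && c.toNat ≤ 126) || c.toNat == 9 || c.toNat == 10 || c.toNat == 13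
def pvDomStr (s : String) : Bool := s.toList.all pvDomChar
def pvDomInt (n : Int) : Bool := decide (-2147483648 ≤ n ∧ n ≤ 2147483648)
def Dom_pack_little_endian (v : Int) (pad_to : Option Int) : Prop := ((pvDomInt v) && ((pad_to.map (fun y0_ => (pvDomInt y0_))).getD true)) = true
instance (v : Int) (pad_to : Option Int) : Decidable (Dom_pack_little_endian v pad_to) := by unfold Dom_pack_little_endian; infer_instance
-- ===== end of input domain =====

-- B replaces A's destructive while-loop with bitwise mask/shift and ljust by a recursive
-- base-256 divmod decomposition with arithmetic NUL padding (objective: alternative).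


-- ===== PORT A =====
-- ret.ljust(w, '\0') on the underlying char list (exact: pads right with NUL up to w, never truncates; w ≤ len or w < 0 is a no-op)
def pyLjustNul (cs : List Char) (w : Int) : List Char :=
  cs ++ List.replicate (w.toNat - cs.length) (Char.ofNat 0)

-- the `while v:` loop; the guard `0 < v` (instead of `v ≠ 0`) only totalizes it: on v < 0 the
-- Python loop never terminates, and such v are excluded by Pre_.
def packA_loop (ret : List Char) (v : Int) : List Char :=
  if h : 0 < v then
    packA_loop (ret ++ [Char.ofNat (PySem.Int.band v 255).toNat]) (v >>> (8:Nat))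
  else ret
termination_by v.toNat
decreasing_by
  have hm : v = ((v.toNat : Nat) : Int) := by omega
  rw [hm]
  show (((v.toNat >>> 8 : Nat) : Int)).toNat < v.toNat
  simp [Nat.shiftRight_eq_div_pow]
  omega

def pack_little_endian (v : Int) (pad_to : Option Int) : String :=
  let ret := packA_loop [] v
  let ret := match pad_to with
    | some p => pyLjustNul ret p
    | none => ret
  String.mk ret

-- ===== PORT B =====
-- the recursive helper `go`: divmod(x, 256), prepend chr(r), recurse on q; the guard `0 < x`
-- (instead of `x ≠ 0`) only totalizes it: on x < 0 the Python recursion never terminates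
-- (divmod keeps returning q = -1), and such inputs are excluded by Pre_.
def packB_go (x : Int) : List Char :=
  if h : 0 < x then
    Char.ofNat (PySem.Int.mod x 256).toNat :: packB_go (PySem.Int.floordiv x 256)
  else []
termination_by x.toNat
decreasing_by
  simp [PySem.Int.floordiv, Int.fdiv_eq_ediv_of_nonneg _ (by norm_num : (0:Int) ≤ 256)]
  omega

def pack_little_endian_alt (v : Int) (pad_to : Option Int) : String :=
  let ret := packB_go v
  let ret := match pad_to with
    | some p => if (ret.length : Int) < p then ret ++ List.replicate (p - ret.length).toNat (Char.ofNat 0) else ret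
    | none => ret
  String.mk ret

-- ===== PRECONDITION & SPEC =====
-- Pre_ excludes v < 0: there the Python A never terminates (v >>= 8 converges to -1, so `while v` loops forever).
def Pre_pack_little_endian (v : Int) (pad_to : Option Int) : Prop := 0 ≤ v
instance (v : Int) (pad_to : Option Int) : Decidable (Pre_pack_little_endian v pad_to) := by unfold Pre_pack_little_endian; infer_instance

def pvWitness_pack_little_endian : Int × Option Int := (258, some 4)

def Spec_pack_little_endian (v : Int) (pad_to : Option Int) (out : String) : Prop := out = pack_little_endian_alt v pad_to
instance (v : Int) (pad_to : Option Int) (out : String) : Decidable (Spec_pack_little_endian v pad_to out) := by unfold Spec_pack_little_endian; infer_instance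

-- ===== CLAIM (what is proved, stated in full; the proofs are below) =====
def Claim_equal_pack_little_endian : Prop := ∀ (v : Int) (pad_to : Option Int), Dom_pack_little_endian v pad_to → Pre_pack_little_endian v pad_to → Spec_pack_little_endian v pad_to (pack_little_endian v pad_to)

-- ===== LEMMAS AND PROOFS =====

-- A's mask-and-shift step produces B's divmod step, for nonnegative v
theorem band255_eq_mod (m : Nat) : PySem.Int.band ((m : Int)) 255 = PySem.Int.mod (m : Int) 256 := by
  show ((Nat.land m 255 : Nat) : Int) = PySem.Int.mod (m : Int) 256
  have h : Nat.land m 255 = m % 256 := by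
    simpa using Nat.and_two_pow_sub_one_eq_mod m 8
  rw [h]
  simp [PySem.Int.mod, Int.fmod_eq_emod_of_nonneg _ (by norm_num : (0:Int) ≤ 256)]

theorem shift8_eq_floordiv (m : Nat) : ((m : Int) >>> (8:Nat)) = PySem.Int.floordiv (m : Int) 256 := by
  show ((m >>> 8 : Nat) : Int) = PySem.Int.floordiv (m : Int) 256
  simp [Nat.shiftRight_eq_div_pow, PySem.Int.floordiv, Int.fdiv_eq_ediv_of_nonneg _ (by norm_num : (0:Int) ≤ 256)]

-- loop characterization: packA_loop accumulates exactly packB_go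
theorem packA_loop_eq (m : Nat) : ∀ ret : List Char, packA_loop ret (m : Int) = ret ++ packB_go (m : Int) := by
  induction m using Nat.strong_induction_on with
  | _ m ih =>
    intro ret
    by_cases hm : 0 < m
    · have hpos : (0 : Int) < (m : Int) := by exact_mod_cast hm
      rw [packA_loop, dif_pos hpos, packB_go, dif_pos hpos]
      rw [shift8_eq_floordiv, band255_eq_mod]
      have hdiv : PySem.Int.floordiv (m : Int) 256 = ((m / 256 : Nat) : Int) := by
        simp [PySem.Int.floordiv, Int.fdiv_eq_ediv_of_nonneg _ (by norm_num : (0:Int) ≤ 256)]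
      rw [hdiv, ih (m / 256) (Nat.div_lt_self hm (by norm_num)) _]
      simp
    · have hm0 : m = 0 := by omega
      subst hm0
      rw [packA_loop, packB_go]
      simp

-- the two paddings agree
theorem pad_eq (cs : List Char) (p : Int) :
    pyLjustNul cs p = (if (cs.length : Int) < p then cs ++ List.replicate (p - cs.length).toNat (Char.ofNat 0) else cs) := by
  unfold pyLjustNul
  split_ifs with h
  · have hn : (p - (cs.length : Int)).toNat = p.toNat - cs.length := by omega
    rw [hn]
  · have : p.toNat - cs.length = 0 := by omega
    simp [this]

-- ===== VERDICT (by name: the statement is the Claim_ definition above) =====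
theorem pack_little_endian_spec : Claim_equal_pack_little_endian := by
  intro v pad_to _ hpre
  unfold Spec_pack_little_endian pack_little_endian pack_little_endian_alt
  have hv : v = ((v.toNat : Nat) : Int) := by
    unfold Pre_pack_little_endian at hpre; omega
  rw [hv, packA_loop_eq v.toNat []]
  cases pad_to with
  | none => rfl
  | some p => simp [pad_eq]
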